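-- pv_equiv track=rewrite | github.com/alexeygrigorev/codeforces-py | round_edu_170/task_c.py | find_consecutive_parts
-- ===== SOURCE A (Python) =====
-- def find_consecutive_parts(pairs):
--     if len(pairs) == 0:
--         return []
--
--     results = []
--     n = len(pairs)
--
--     prev = pairs[0][0] - 1
--     start = 0
--
--     for end in range(n):
--         cur = pairs[end][0]
--
--         if prev + 1 != cur:
--             results.append((start, end))
--             start = end
--
--         prev = cur
--
--     results.append((start, n))
--
--     return results
-- ===== SOURCE B (Python) =====
-- def find_consecutive_parts(pairs):
--     def run_lengths(vals):
--         if not vals: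
--             return []
--         j = 1
--         while j < len(vals) and vals[j] == vals[j - 1] + 1:
--             j += 1
--         return [j] + run_lengths(vals[j:])
--
--     out = []
--     pos = 0
--     for length in run_lengths([p[0] for p in pairs]):
--         out.append((pos, pos + length))
--         pos += length
--     return out
-- ===== Notes on version B (the rewrite author's own statement) =====
-- stated objective: alternative
-- what changed: B splits the task into two stages with a different traversal: a recursive run-length decomposition of the first components (an inner while loop measures one run, recursion handles the remaining suffix) and then a prefix-sum pass that turns the run lengths into (start, end) ranges, instead of A's single indexed scan carrying prev/start/results state.
import Mathlib
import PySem

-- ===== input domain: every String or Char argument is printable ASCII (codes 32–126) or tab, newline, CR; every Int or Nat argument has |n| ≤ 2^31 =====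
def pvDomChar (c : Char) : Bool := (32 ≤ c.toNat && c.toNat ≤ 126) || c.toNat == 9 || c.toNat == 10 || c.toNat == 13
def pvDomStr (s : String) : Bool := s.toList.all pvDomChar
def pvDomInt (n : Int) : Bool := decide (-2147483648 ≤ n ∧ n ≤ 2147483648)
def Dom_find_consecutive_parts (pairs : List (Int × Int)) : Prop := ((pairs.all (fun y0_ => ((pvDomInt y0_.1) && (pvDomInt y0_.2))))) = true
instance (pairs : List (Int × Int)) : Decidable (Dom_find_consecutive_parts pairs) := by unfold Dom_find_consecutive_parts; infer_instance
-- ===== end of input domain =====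

-- B replaces A's single indexed scan (prev/start/results state) with a recursive
-- run-length decomposition of the first components followed by a prefix-sum pass
-- turning lengths into ranges (objective: alternative decomposition, same cost).

-- ===== PORT A =====
-- pairs[end][0]: every access in A's loop is in range, so pyGetD with a dummy default is exact here.
def find_consecutive_parts (pairs : List (Int × Int)) : List (Int × Int) :=
  if pairs.length = 0 then []
  else
    let n : Int := pairs.length
    let prev0 : Int := (PySem.List.pyGetD pairs 0 (0, 0)).1 - 1
    -- state s = (results, prev, start); the loop body mirrors A line by line
    let s := (PySem.List.pyRange 0 n 1).foldl
      (fun (s : List (Int × Int) × Int × Int) e =>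
        let cur := (PySem.List.pyGetD pairs e (0, 0)).1
        if s.2.1 + 1 ≠ cur then (s.1 ++ [(s.2.2, e)], cur, e)
        else (s.1, cur, s.2.2))
      ([], prev0, 0)
    s.1 ++ [(s.2.2, n)]

-- ===== PORT B =====
-- B's inner 'while j < len(vals) and vals[j] == vals[j-1] + 1' walks the list one
-- element at a time comparing with the previous value; it is ported hand-for-hand
-- as the structural recursion pvWhileB prev rest (= number of loop iterations),
-- so j = 1 + pvWhileB v rest and vals[j:] = rest.drop (pvWhileB v rest).
def pvWhileB (prev : Int) : List Int → Nat
  | [] => 0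
  | v :: rest => if v = prev + 1 then 1 + pvWhileB v rest else 0

-- run_lengths(vals): [] for empty, else [j] + run_lengths(vals[j:])
def pvRunLengthsB : List Int → List Nat
  | [] => []
  | v :: rest =>
    (1 + pvWhileB v rest) :: pvRunLengthsB (rest.drop (pvWhileB v rest))
  termination_by vs => vs.length
  decreasing_by simp

def find_consecutive_parts_alt (pairs : List (Int × Int)) : List (Int × Int) :=
  let lens := pvRunLengthsB (pairs.map (fun p => p.1))
  -- the for loop over run_lengths, state s = (out, pos)
  (lens.foldl
    (fun (s : List (Int × Int) × Int) (L : Nat) => (s.1 ++ [(s.2, s.2 + (L : Int))], s.2 + (L : Int)))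
    ([], 0)).1

-- ===== PRECONDITION & SPEC =====
def Spec_find_consecutive_parts (pairs : List (Int × Int)) (out : List (Int × Int)) : Prop := out = find_consecutive_parts_alt pairs
instance (pairs : List (Int × Int)) (out : List (Int × Int)) : Decidable (Spec_find_consecutive_parts pairs out) := by unfold Spec_find_consecutive_parts; infer_instance

-- ===== CLAIM (what is proved, stated in full; the proofs are below) =====
def Claim_equal_find_consecutive_parts : Prop := ∀ (pairs : List (Int × Int)), Dom_find_consecutive_parts pairs → Spec_find_consecutive_parts pairs (find_consecutive_parts pairs)

-- ===== LEMMAS AND PROOFS =====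

-- proof-only helper: the ranges both programs denote, as a structural recursion.
-- runsFrom prev vs start a = A's remaining output when the loop state is
-- (prev, start), index a, and the values still to scan are vs (plus the final range).
def runsFrom (prev : Int) : List Int → Int → Int → List (Int × Int)
  | [], start, a => [(start, a)]
  | v :: vs, start, a =>
    if prev + 1 = v then runsFrom v vs start (a + 1)
    else (start, a) :: runsFrom v vs a (a + 1)

-- proof-only helper: B's prefix-sum loop as a structural recursion
def rangesOf : List Nat → Int → List (Int × Int)
  | [], _ => []
  | L :: ls, pos => (pos, pos + (L : Int)) :: rangesOf ls (pos + (L : Int))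

-- B's foldl builds rangesOf
theorem foldB_eq (ls : List Nat) : ∀ (acc : List (Int × Int)) (pos : Int),
    (ls.foldl (fun (s : List (Int × Int) × Int) (L : Nat) =>
        (s.1 ++ [(s.2, s.2 + (L : Int))], s.2 + (L : Int))) (acc, pos)).1
      = acc ++ rangesOf ls pos := by
  induction ls with
  | nil => intro acc pos; simp [rangesOf]
  | cons L ls ih =>
    intro acc pos
    rw [List.foldl_cons, ih]
    simp [rangesOf]

-- the run-length decomposition denotes the same ranges as runsFrom
-- the well-founded equations of pvRunLengthsB, restated for rewriting
theorem pvRunLengthsB_nil : pvRunLengthsB [] = [] := by rw [pvRunLengthsB]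

theorem pvRunLengthsB_cons (v : Int) (rest : List Int) :
    pvRunLengthsB (v :: rest)
      = (1 + pvWhileB v rest) :: pvRunLengthsB (rest.drop (pvWhileB v rest)) := by
  rw [pvRunLengthsB]

theorem runsFrom_eq_ranges (n : Nat) : ∀ (vs : List Int), vs.length ≤ n → ∀ (prev start a : Int),
    runsFrom prev vs start a
      = (start, a + (pvWhileB prev vs : Int))
          :: rangesOf (pvRunLengthsB (vs.drop (pvWhileB prev vs)))
               (a + (pvWhileB prev vs : Int)) := by
  induction n with
  | zero =>
    intro vs hlen prev start a
    have : vs = [] := List.length_eq_zero_iff.mp (Nat.le_zero.mp hlen)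
    subst this
    simp [runsFrom, pvWhileB, pvRunLengthsB_nil, rangesOf]
  | succ m ih =>
    intro vs hlen prev start a
    cases vs with
    | nil => simp [runsFrom, pvWhileB, pvRunLengthsB_nil, rangesOf]
    | cons v rest =>
      have hr : rest.length ≤ m := by simpa using Nat.lt_succ_iff.mp (by simpa using hlen)
      by_cases h : prev + 1 = v
      · rw [show runsFrom prev (v :: rest) start a = runsFrom v rest start (a + 1) by
            simp [runsFrom, h],
          show pvWhileB prev (v :: rest) = 1 + pvWhileB v rest by
            simp [pvWhileB, h.symm]]
        rw [ih rest hr v start (a + 1)]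
        rw [show a + ((1 + pvWhileB v rest : Nat) : Int)
              = a + 1 + (pvWhileB v rest : Int) by push_cast; ring]
        rw [Nat.add_comm 1 (pvWhileB v rest), List.drop_succ_cons]
      · rw [show runsFrom prev (v :: rest) start a
              = (start, a) :: runsFrom v rest a (a + 1) by simp [runsFrom, h],
          show pvWhileB prev (v :: rest) = 0 by
            simp [pvWhileB]; intro he; exact absurd he.symm h]
        rw [ih rest hr v a (a + 1)]
        simp only [List.drop_zero, Nat.cast_zero, add_zero, pvRunLengthsB_cons, rangesOf]
        rw [show a + 1 + (pvWhileB v rest : Int)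
              = a + ((1 + pvWhileB v rest : Nat) : Int) by push_cast; ring]

-- A's loop, expressed over enumerate, produces acc ++ runsFrom
theorem foldA_eq (ps : List (Int × Int)) : ∀ (a : Int) (acc : List (Int × Int)) (prev start : Int),
    (let r := (PySem.List.enumerate ps a).foldl
        (fun (s : List (Int × Int) × Int × Int) (ep : Int × (Int × Int)) =>
          if s.2.1 + 1 ≠ ep.2.1 then (s.1 ++ [(s.2.2, ep.1)], ep.2.1, ep.1)
          else (s.1, ep.2.1, s.2.2)) (acc, prev, start);
      r.1 ++ [(r.2.2, a + ps.length)])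
      = acc ++ runsFrom prev (ps.map (fun p => p.1)) start a := by
  induction ps with
  | nil => intro a acc prev start; simp [PySem.List.enumerate_nil, runsFrom]
  | cons p ps ih =>
    intro a acc prev start
    rw [PySem.List.enumerate_cons]
    simp only [List.foldl_cons, List.map_cons, runsFrom]
    by_cases h : prev + 1 = p.1
    · rw [if_neg (by simp [h]), if_pos h]
      have := ih (a + 1) acc p.1 start
      simpa [add_assoc, add_comm, add_left_comm] using this
    · rw [if_pos (by simpa using h), if_neg h]
      have := ih (a + 1) (acc ++ [(start, a)]) p.1 a
      simp only [List.append_assoc, List.cons_append, List.nil_append] at this ⊢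
      simpa [add_assoc, add_comm, add_left_comm] using this

-- ===== VERDICT (by name: the statement is the Claim_ definition above) =====
theorem find_consecutive_parts_spec : Claim_equal_find_consecutive_parts := by
  intro pairs _
  unfold Spec_find_consecutive_parts find_consecutive_parts find_consecutive_parts_alt
  cases pairs with
  | nil => simp [pvRunLengthsB_nil]
  | cons q rest =>
    rw [if_neg (by simp)]
    dsimp only
    rw [foldB_eq]
    have hA := foldA_eq (q :: rest) 0 [] ((PySem.List.pyGetD (q :: rest) 0 ((0 : Int), (0 : Int))).1 - 1) 0
    rw [PySem.List.enumerate_eq_map_pyRange (q :: rest) ((0 : Int), (0 : Int)), List.foldl_map] at hA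
    simp only [List.nil_append, zero_add, PySem.List.len] at hA ⊢
    rw [hA]
    have h0 : PySem.List.pyGetD (q :: rest) (0 : Int) ((0 : Int), (0 : Int)) = q := by
      simp [PySem.List.pyGetD, PySem.List.pyGet?, PySem.List.pyIdx?]
    rw [h0]
    simp only [List.map_cons]
    rw [runsFrom_eq_ranges (q.1 :: rest.map (fun p => p.1)).length
          (q.1 :: rest.map (fun p => p.1)) le_rfl (q.1 - 1) 0 0]
    rw [show pvWhileB (q.1 - 1) (q.1 :: rest.map (fun p => p.1))
          = 1 + pvWhileB q.1 (rest.map (fun p => p.1)) by simp [pvWhileB]]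
    rw [pvRunLengthsB_cons, rangesOf]
    rw [Nat.add_comm 1 (pvWhileB q.1 (rest.map (fun p => p.1))), List.drop_succ_cons]
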